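-- pv_equiv track=rewrite | github.com/pypi-data/pypi-mirror-219 | packages/pyscivis/pyscivis-0.9.2-py3-none-any.whl/pyscivis/visualizer/util/jit_nanminmax.py | even_chunk_sizes
-- ===== SOURCE A (Python) =====
-- from typing import Union, Tuple, List
--
-- def even_chunk_sizes(dividend: int,
--                      divisor: int
--                      ) -> List[int]:
--     """ Calculate even chunk sizes. """
--     quotient, remainder = divmod(dividend, divisor)
--     cells = [quotient for _ in range(divisor)]
--     for i in range(remainder):
--         cells[i] += 1
--     return cells
-- ===== SOURCE B (Python) =====
-- def even_chunk_sizes(dividend: int, divisor: int) -> list: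
--     """Greedy peeling: repeatedly take one ceiling-sized chunk of what remains."""
--     sizes = []
--     remaining, chunks = dividend, divisor
--     while chunks > 0:
--         head = -(-remaining // chunks)  # ceiling division: largest chunk first
--         sizes.append(head)
--         remaining -= head
--         chunks -= 1
--     return sizes
-- ===== Notes on version B (the rewrite author's own statement) =====
-- stated objective: alternative
-- what changed: Replaces divmod-then-patch (build divisor copies of the floor quotient, then increment the first remainder cells) with a greedy peeling loop that uses no divmod/remainder at all: repeatedly take one ceiling-sized chunk -(-remaining//chunks) off what remains.
import Mathlib
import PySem

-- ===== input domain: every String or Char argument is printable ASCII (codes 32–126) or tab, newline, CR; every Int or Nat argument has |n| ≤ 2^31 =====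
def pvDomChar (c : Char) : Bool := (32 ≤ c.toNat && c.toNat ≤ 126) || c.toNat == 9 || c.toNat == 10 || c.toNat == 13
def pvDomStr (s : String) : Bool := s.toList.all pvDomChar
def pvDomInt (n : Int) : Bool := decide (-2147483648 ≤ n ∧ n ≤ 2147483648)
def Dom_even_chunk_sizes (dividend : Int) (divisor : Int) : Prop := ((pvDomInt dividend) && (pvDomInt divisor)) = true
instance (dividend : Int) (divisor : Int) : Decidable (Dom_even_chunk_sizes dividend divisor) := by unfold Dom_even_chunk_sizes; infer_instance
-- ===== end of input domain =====

-- B replaces A's divmod/build-then-patch construction with a greedy peeling loop that takes one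
-- ceiling-sized chunk -(-remaining//chunks) of what remains at a time (alternative algorithm; same cost).
-- ceiling-sized chunk -(-dividend//divisor) at a time (alternative algorithm; same cost).


-- ===== PORT A =====
-- quotient, remainder = divmod(dividend, divisor); cells = [quotient]*divisor built by a
-- comprehension over range(divisor); then a loop adds 1 to cells[i] for i in range(remainder).
-- (indices i in range(remainder) are nonnegative, so `i.toNat` / `getD`/`set` are exact here)
def even_chunk_sizes (dividend : Int) (divisor : Int) : List Int :=
  let quotient := PySem.Int.floordiv dividend divisor
  let remainder := PySem.Int.mod dividend divisor
  let cells := (PySem.List.pyRange 0 divisor 1).map (fun _ => quotient)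
  (PySem.List.pyRange 0 remainder 1).foldl
    (fun cs i => cs.set i.toNat (cs.getD i.toNat 0 + 1)) cells

-- ===== PORT B =====
-- greedy peeling loop: while chunks > 0, append head = -(-remaining // chunks)
-- (ceiling division) to sizes, subtract it from remaining, decrement chunks.
def pvChunkLoop (sizes : List Int) (remaining : Int) (chunks : Int) : List Int :=
  if 0 < chunks then
    let head := -(PySem.Int.floordiv (-remaining) chunks)
    pvChunkLoop (sizes ++ [head]) (remaining - head) (chunks - 1)
  else sizes
termination_by chunks.toNat
decreasing_by omega

def even_chunk_sizes_alt (dividend : Int) (divisor : Int) : List Int :=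
  pvChunkLoop [] dividend divisor

-- ===== PRECONDITION & SPEC =====
-- divisor = 0 makes divmod raise ZeroDivisionError in A.
def Pre_even_chunk_sizes (dividend : Int) (divisor : Int) : Prop := divisor ≠ 0
instance (dividend : Int) (divisor : Int) : Decidable (Pre_even_chunk_sizes dividend divisor) := by unfold Pre_even_chunk_sizes; infer_instance
def pvWitness_even_chunk_sizes : Int × Int := (7, 3)
def Spec_even_chunk_sizes (dividend : Int) (divisor : Int) (out : List Int) : Prop := out = even_chunk_sizes_alt dividend divisor
instance (dividend : Int) (divisor : Int) (out : List Int) : Decidable (Spec_even_chunk_sizes dividend divisor out) := by unfold Spec_even_chunk_sizes; infer_instance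

-- ===== CLAIM (what is proved, stated in full; the proofs are below) =====
def Claim_equal_even_chunk_sizes : Prop := ∀ (dividend : Int) (divisor : Int), Dom_even_chunk_sizes dividend divisor → Pre_even_chunk_sizes dividend divisor → Spec_even_chunk_sizes dividend divisor (even_chunk_sizes dividend divisor)

-- ===== LEMMAS AND PROOFS =====

-- Uniqueness of Python's floor division/remainder for a positive divisor.
theorem pv_divmod_unique (a b q r : Int) (hb : 0 < b)
    (hid : a = q * b + r) (h0 : 0 ≤ r) (hr : r < b) :
    PySem.Int.floordiv a b = q ∧ PySem.Int.mod a b = r := by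
  have hq : PySem.Int.floordiv a b = q := by
    rw [PySem.Int.floordiv_eq_iff_of_pos hb]
    constructor <;> nlinarith
  refine ⟨hq, ?_⟩
  have := PySem.Int.floordiv_mul_add_mod a b
  rw [hq] at this
  omega

-- Bounds of Python's floor-mod for positive divisors.
theorem pv_mod_bounds_pos (a b : Int) (hb : 0 < b) :
    0 ≤ PySem.Int.mod a b ∧ PySem.Int.mod a b < b := by
  rw [PySem.Int.mod_eq_emod_of_pos hb]
  exact ⟨Int.emod_nonneg a (by omega), Int.emod_lt_of_pos a hb⟩

-- Bounds of Python's floor-mod for negative divisors (remainder has the divisor's sign).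
theorem pv_mod_bounds_neg (a b : Int) (hb : b < 0) :
    PySem.Int.mod a b ≤ 0 ∧ b < PySem.Int.mod a b := by
  unfold PySem.Int.mod
  rw [Int.fmod_eq_emod]
  have he : a % b = a % (-b) := (Int.emod_neg a b).symm
  have h1 := Int.emod_nonneg a (by omega : -b ≠ 0)
  have h2 := Int.emod_lt_of_pos a (by omega : (0:Int) < -b)
  by_cases hdvd : b ∣ a
  · have hz : a % b = 0 := Int.emod_eq_zero_of_dvd hdvd
    simp [hdvd, hz]
    omega
  · have hne : a % b ≠ 0 := fun h => hdvd (Int.dvd_of_emod_eq_zero h)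
    have : ¬ (0 ≤ b ∨ b ∣ a) := by
      rintro (h | h) <;> [omega; exact hdvd h]
    rw [if_neg this]
    omega

-- A's patch loop: incrementing cells 0..n-1 of [q]*m (n ≤ m) gives [q+1]*n ++ [q]*(m-n).
theorem pv_fold_inc (q : Int) :
    ∀ (n m : Nat), n ≤ m →
      (PySem.List.pyRange 0 (n : Int) 1).foldl
        (fun cs i => cs.set i.toNat (cs.getD i.toNat 0 + 1)) (List.replicate m q)
      = List.replicate n (q + 1) ++ List.replicate (m - n) q := by
  intro n
  induction n with
  | zero =>
    intro m _
    simp [PySem.List.pyRange_one_eq_nil (by omega : (0:Int) ≤ 0)]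
  | succ n ih =>
    intro m hm
    have hrange : PySem.List.pyRange 0 ((n + 1 : Nat) : Int) 1
        = PySem.List.pyRange 0 (n : Int) 1 ++ [(n : Int)] := by
      have := PySem.List.pyRange_one_succ_right (a := 0) (b := (n : Int)) (by omega)
      push_cast
      push_cast at this
      exact this
    rw [hrange, List.foldl_append, ih m (by omega)]
    simp only [List.foldl_cons, List.foldl_nil, Int.toNat_natCast]
    have hgetD : (List.replicate n (q + 1) ++ List.replicate (m - n) q).getD n 0 = q := by
      rw [List.getD_eq_getElem?_getD, List.getElem?_append_right (by simp)]
      have hlt : 0 < m - n := by omega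
      simp [hlt]
    have hset : (List.replicate n (q + 1) ++ List.replicate (m - n) q).set n (q + 1)
        = List.replicate n (q + 1) ++ (List.replicate (m - n) q).set 0 (q + 1) := by
      rw [List.set_append]
      simp
    rw [hgetD, hset]
    obtain ⟨k, hk⟩ : ∃ k, m - n = k + 1 := ⟨m - n - 1, by omega⟩
    rw [hk, List.replicate_succ, List.set_cons_zero]
    have : m - (n + 1) = k := by omega
    rw [this, List.replicate_succ']
    simp

-- Closed form of A for a positive divisor: the two-block list.
theorem pv_A_closed (a b : Int) (hb : 0 < b) :
    even_chunk_sizes a b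
      = List.replicate (PySem.Int.mod a b).toNat (PySem.Int.floordiv a b + 1)
        ++ List.replicate (b - PySem.Int.mod a b).toNat (PySem.Int.floordiv a b) := by
  unfold even_chunk_sizes
  obtain ⟨h1, h2⟩ := pv_mod_bounds_pos a b hb
  set q := PySem.Int.floordiv a b
  set r := PySem.Int.mod a b
  have hmap : (PySem.List.pyRange 0 b 1).map (fun _ => q) = List.replicate b.toNat q := by
    rw [List.map_const']
    congr 1
    rw [PySem.List.length_pyRange_one]
    omega
  have hcastr : r = ((r.toNat : Nat) : Int) := (Int.toNat_of_nonneg h1).symm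
  simp only [hmap]
  rw [hcastr, pv_fold_inc q r.toNat b.toNat (by omega)]
  congr 2
  omega

-- Closed form of B's greedy peeling loop for a positive divisor: the two-block list.
theorem pv_alt_closed :
    ∀ (n : Nat) (acc : List Int) (a b : Int), b = (n : Int) → 0 < b →
      pvChunkLoop acc a b
        = acc ++ List.replicate (PySem.Int.mod a b).toNat (PySem.Int.floordiv a b + 1)
          ++ List.replicate (b - PySem.Int.mod a b).toNat (PySem.Int.floordiv a b) := by
  intro n
  induction n with
  | zero => intro acc a b hbn hb; omega
  | succ k ih =>
    intro acc a b hbn hb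
    obtain ⟨h1, h2⟩ := pv_mod_bounds_pos a b hb
    have hid := PySem.Int.floordiv_mul_add_mod a b
    set q := PySem.Int.floordiv a b with hqd
    set r := PySem.Int.mod a b with hrd
    rw [pvChunkLoop, if_pos hb]
    by_cases hr0 : r = 0
    · -- exact division: head = q, the rest is all q's
      have hhead : -(PySem.Int.floordiv (-a) b) = q := by
        rw [PySem.Int.neg_floordiv_neg_eq_iff_of_pos hb]
        have e1 : (q - 1) * b = q * b - b := by ring
        exact ⟨by rw [e1]; linarith, by linarith⟩
      simp only [hhead]
      by_cases hb1 : b = 1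
      · rw [pvChunkLoop, if_neg (show ¬ (0 : Int) < b - 1 by omega)]
        have h3 : r.toNat = 0 := by omega
        have h4 : (b - r).toNat = 1 := by omega
        rw [h3, h4]
        simp
      · have hb1' : 0 < b - 1 := by omega
        have huniq := pv_divmod_unique (a - q) (b - 1) q 0 hb1'
          (by linear_combination -hid + hr0) le_rfl hb1'
        rw [ih (acc ++ [q]) (a - q) (b - 1) (by omega) hb1', huniq.1, huniq.2]
        have h3 : r.toNat = 0 := by omega
        have h4 : (b - r).toNat = (b - 1 - 0).toNat + 1 := by omega
        rw [h3, h4, List.replicate_succ]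
        simp
    · -- r > 0: head = q + 1
      have hhead : -(PySem.Int.floordiv (-a) b) = q + 1 := by
        rw [PySem.Int.neg_floordiv_neg_eq_iff_of_pos hb]
        have e1 : (q + 1 - 1) * b = q * b := by ring
        have e2 : (q + 1) * b = q * b + b := by ring
        exact ⟨by rw [e1]; omega, by rw [e2]; omega⟩
      simp only [hhead]
      have hb1' : 0 < b - 1 := by omega
      have huniq := pv_divmod_unique (a - (q + 1)) (b - 1) q (r - 1) hb1'
        (by linear_combination -hid) (by omega) (by omega)
      rw [ih (acc ++ [q + 1]) (a - (q + 1)) (b - 1) (by omega) hb1', huniq.1, huniq.2]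
      have h3 : r.toNat = (r - 1).toNat + 1 := by omega
      have h4 : (b - 1 - (r - 1)).toNat = (b - r).toNat := by omega
      rw [h3, h4, List.replicate_succ]
      simp

-- ===== VERDICT (by name: the statement is the Claim_ definition above) =====
theorem even_chunk_sizes_spec : Claim_equal_even_chunk_sizes := by
  intro dividend divisor _ hpre
  unfold Spec_even_chunk_sizes even_chunk_sizes_alt
  rcases lt_or_gt_of_ne hpre with hneg | hpos
  · -- divisor < 0: both sides are empty
    obtain ⟨h1, h2⟩ := pv_mod_bounds_neg dividend divisor hneg
    simp only [even_chunk_sizes,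
      PySem.List.pyRange_one_eq_nil (show divisor ≤ (0:Int) by omega),
      PySem.List.pyRange_one_eq_nil (show PySem.Int.mod dividend divisor ≤ 0 by omega),
      List.map_nil, List.foldl_nil]
    rw [pvChunkLoop, if_neg (show ¬ (0 : Int) < divisor by omega)]
  · rw [pv_A_closed dividend divisor hpos,
        pv_alt_closed divisor.toNat [] dividend divisor (by omega) hpos]
    simp
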